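-- pv_equiv track=rewrite | github.com/riyuna/problem-solving | Codeforce/cf755/C.py | solve
-- ===== SOURCE A (Python) =====
-- def solve(L1, L2):
--     L2.sort(reverse=True)
--     d=dict()
--     for i in L1:
--         if i not in d:d[i]=0
--         d[i]+=1
--     for i in L2:
--         if i in d and d[i]:
--             d[i]-=1
--         elif (i-1) in d and d[i-1]:
--             d[i-1]-=1
--         else:
--             return False
--     return True
-- ===== SOURCE B (Python) =====
-- def solve(L1, L2):
--     L2.sort(reverse=True)
--     d = {}
--     for x in L1:
--         d[x] = d.get(x, 0) + 1
--     i = 0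
--     n = len(L2)
--     while i < n:
--         v = L2[i]
--         j = i + 1
--         while j < n and L2[j] == v:
--             j += 1
--         c = j - i
--         avail = d.get(v, 0)
--         if c <= avail:
--             d[v] = avail - c
--         else:
--             overflow = c - avail
--             below = d.get(v - 1, 0)
--             if overflow > below:
--                 return False
--             d[v] = 0
--             d[v - 1] = below - overflow
--         i = j
--     return True
-- ===== Notes on version B (the rewrite author's own statement) =====
-- stated objective: alternative
-- what changed: Replaces A's element-by-element greedy over L2 with a grouped pass over maximal runs of equal values in the descending sort, consuming each run at once from a get-based counter and carrying a single overflow onto the value below; L2 is still sorted in place.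
import Mathlib
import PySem

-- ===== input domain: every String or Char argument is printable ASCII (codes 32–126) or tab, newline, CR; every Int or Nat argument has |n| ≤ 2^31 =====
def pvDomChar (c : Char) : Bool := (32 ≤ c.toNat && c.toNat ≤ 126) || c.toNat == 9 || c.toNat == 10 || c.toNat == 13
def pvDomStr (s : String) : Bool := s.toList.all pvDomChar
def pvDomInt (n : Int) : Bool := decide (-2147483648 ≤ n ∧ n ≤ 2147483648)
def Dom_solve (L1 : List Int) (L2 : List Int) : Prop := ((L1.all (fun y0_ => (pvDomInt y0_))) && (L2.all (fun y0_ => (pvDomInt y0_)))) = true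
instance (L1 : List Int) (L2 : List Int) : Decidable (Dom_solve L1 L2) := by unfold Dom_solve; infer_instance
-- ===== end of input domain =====

-- B is a grouped re-decomposition of A's greedy (same cost); A sorts L2 in place and B does too,
-- so the equivalence proved here is about the return value (the observable mutation is identical).

-- ===== PORT A =====
-- counting loop: `if i not in d: d[i]=0` then `d[i] += 1`
def solveBuild (d : PySem.Dict Int Int) : List Int → PySem.Dict Int Int
  | [] => d
  | i :: rest =>
      let d1 := if d.contains i then d else d.insert i 0
      solveBuild (d1.modify i 0 (· + 1)) rest

-- main loop with early `return False`
def solveLoop (d : PySem.Dict Int Int) : List Int → Bool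
  | [] => true
  | i :: rest =>
      if d.contains i && d.getD i 0 != 0 then
        solveLoop (d.modify i 0 (· - 1)) rest
      else if d.contains (i - 1) && d.getD (i - 1) 0 != 0 then
        solveLoop (d.modify (i - 1) 0 (· - 1)) rest
      else
        false

def solve (L1 : List Int) (L2 : List Int) : Bool :=
  solveLoop (solveBuild PySem.Dict.empty L1) (PySem.List.sorted L2 (fun x => x) true)

-- ===== PORT B =====
-- counter: `d[x] = d.get(x, 0) + 1`
def altBuild (d : PySem.Dict Int Int) : List Int → PySem.Dict Int Int
  | [] => d
  | x :: rest => altBuild (d.insert x (d.getD x 0 + 1)) rest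

-- outer while over maximal runs of the descending-sorted L2; the inner `while j < n and L2[j] == v`
-- is the takeWhile/dropWhile split of the remaining suffix
def altLoop (d : PySem.Dict Int Int) : List Int → Bool
  | [] => true
  | v :: rest =>
      let c : Int := 1 + (rest.takeWhile (· == v)).length
      let tail := rest.dropWhile (· == v)
      let avail := d.getD v 0
      if c ≤ avail then altLoop (d.insert v (avail - c)) tail
      else
        let overflow := c - avail
        let below := d.getD (v - 1) 0
        if overflow > below then false
        else altLoop ((d.insert v 0).insert (v - 1) (below - overflow)) tail
  termination_by xs => xs.length
  decreasing_by
    all_goals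
      simp only [List.length_cons]
      exact Nat.lt_succ_of_le (List.length_dropWhile_le _ _)

def solve_alt (L1 : List Int) (L2 : List Int) : Bool :=
  altLoop (altBuild PySem.Dict.empty L1) (PySem.List.sorted L2 (fun x => x) true)

-- ===== PRECONDITION & SPEC =====
def Spec_solve (L1 : List Int) (L2 : List Int) (out : Bool) : Prop := out = solve_alt L1 L2
instance (L1 : List Int) (L2 : List Int) (out : Bool) : Decidable (Spec_solve L1 L2 out) := by unfold Spec_solve; infer_instance

-- ===== CLAIM (what is proved, stated in full; the proofs are below) =====
def Claim_equal_solve : Prop := ∀ (L1 : List Int) (L2 : List Int), Dom_solve L1 L2 → Spec_solve L1 L2 (solve L1 L2)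

-- ===== LEMMAS AND PROOFS =====

-- abstract state: the multiset of remaining slots, as a function Int → Int
def upd (g : Int → Int) (k v : Int) : Int → Int := fun x => if x = k then v else g x

def absA (g : Int → Int) : List Int → Bool
  | [] => true
  | i :: rest =>
      if g i ≠ 0 then absA (upd g i (g i - 1)) rest
      else if g (i - 1) ≠ 0 then absA (upd g (i - 1) (g (i - 1) - 1)) rest
      else false

@[simp] lemma upd_self (g : Int → Int) (k v : Int) : upd g k v k = v := by simp [upd]
@[simp] lemma upd_of_ne (g : Int → Int) {k x : Int} (v : Int) (h : x ≠ k) : upd g k v x = g x := by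
  simp [upd, h]

lemma contains_and_ne (d : PySem.Dict Int Int) (i : Int) :
    (d.contains i && d.getD i 0 != 0) = decide (d.getD i 0 ≠ 0) := by
  by_cases h : d.contains i = true
  · by_cases hv : d.getD i 0 = 0 <;> simp [h, hv]
  · have h0 : d.getD i 0 = 0 := PySem.Dict.getD_of_not_contains _ 0 (by simpa using h)
    simp [h, h0]

lemma solveLoop_eq_absA (xs : List Int) (d : PySem.Dict Int Int) :
    solveLoop d xs = absA (fun k => d.getD k 0) xs := by
  induction xs generalizing d with
  | nil => rfl
  | cons i rest ih =>
      rw [solveLoop, absA, contains_and_ne, contains_and_ne]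
      simp only [decide_eq_true_eq]
      by_cases h1 : d.getD i 0 ≠ 0
      · rw [if_pos h1, if_pos h1, ih]
        congr 1
        funext k
        by_cases hk : k = i <;> simp [hk, PySem.Dict.getD_modify, upd]
      · rw [if_neg h1, if_neg h1]
        by_cases h2 : d.getD (i - 1) 0 ≠ 0
        · rw [if_pos h2, if_pos h2, ih]
          congr 1
          funext k
          by_cases hk : k = i - 1 <;> simp [hk, PySem.Dict.getD_modify, upd]
        · rw [if_neg h2, if_neg h2]

lemma altLoop_nil (d : PySem.Dict Int Int) : altLoop d [] = true := by
  rw [altLoop]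

lemma altLoop_cons (d : PySem.Dict Int Int) (v : Int) (rest : List Int) :
    altLoop d (v :: rest) =
      (let c : Int := 1 + (rest.takeWhile (· == v)).length
       let tail := rest.dropWhile (· == v)
       let avail := d.getD v 0
       if c ≤ avail then altLoop (d.insert v (avail - c)) tail
       else
         let overflow := c - avail
         let below := d.getD (v - 1) 0
         if overflow > below then false
         else altLoop ((d.insert v 0).insert (v - 1) (below - overflow)) tail) := by
  rw [altLoop]

-- grouped step of absA: c equal elements at once
lemma absA_replicate (c : Nat) (g : Int → Int) (hg : ∀ k, 0 ≤ g k) (v : Int) (tail : List Int) :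
    absA g (List.replicate c v ++ tail) =
      (if (c : Int) ≤ g v then absA (upd g v (g v - c)) tail
       else if (c : Int) - g v ≤ g (v - 1) then
         absA (upd (upd g v 0) (v - 1) (g (v - 1) - ((c : Int) - g v))) tail
       else false) := by
  have hne : v - 1 ≠ v := by omega
  have hne' : v ≠ v - 1 := by omega
  induction c generalizing g with
  | zero =>
      have h0 : upd g v (g v - (0 : Nat)) = g := by
        funext k; by_cases hk : k = v <;> simp [upd, hk]
      rw [h0]
      simp [hg v]
  | succ c ih =>
      rw [List.replicate_succ, List.cons_append, absA]
      by_cases h1 : g v ≠ 0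
      · have hv1 : 1 ≤ g v := by have := hg v; omega
        rw [if_pos h1,
          ih _ (by intro k; simp only [upd]; split_ifs <;> first | omega | exact hg k)]
        simp only [upd_self, upd_of_ne _ _ hne]
        push_cast
        split_ifs <;>
          first
            | rfl
            | omega
            | (congr 1; funext k; simp only [upd]; split_ifs <;> omega)
      · have hv0 : g v = 0 := by omega
        rw [if_neg h1]
        by_cases h2 : g (v - 1) ≠ 0
        · have hb1 : 1 ≤ g (v - 1) := by have := hg (v - 1); omega
          rw [if_pos h2,
            ih _ (by intro k; simp only [upd]; split_ifs <;> first | omega | exact hg k)]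
          simp only [upd_self, upd_of_ne _ _ hne']
          push_cast
          split_ifs <;>
            first
              | rfl
              | omega
              | (congr 1; funext k; simp only [upd]; split_ifs <;> omega)
        · have hb0 : g (v - 1) = 0 := by omega
          rw [if_neg h2]
          push_cast
          split_ifs <;> first | rfl | omega

lemma head_run_decomp (v : Int) (rest : List Int) :
    v :: rest =
      List.replicate (1 + (rest.takeWhile (· == v)).length) v ++ rest.dropWhile (· == v) := by
  have ht : rest.takeWhile (· == v) = List.replicate (rest.takeWhile (· == v)).length v := by
    apply List.eq_replicate_of_mem
    intro b hb
    have := List.mem_takeWhile_imp hb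
    simpa using this
  rw [show (1 + (rest.takeWhile (· == v)).length) = (rest.takeWhile (· == v)).length + 1 by omega,
      List.replicate_succ, List.cons_append]
  conv_lhs => rw [← List.takeWhile_append_dropWhile (p := (· == v)) (l := rest)]
  rw [ht]
  simp

lemma absB_eq_absA (xs : List Int) (g : Int → Int) (hg : ∀ k, 0 ≤ g k) (d : PySem.Dict Int Int)
    (hd : ∀ k, d.getD k 0 = g k) : altLoop d xs = absA g xs := by
  induction hn : xs.length using Nat.strong_induction_on generalizing xs g d with
  | _ n ih =>
  cases xs with
  | nil => rw [altLoop_nil]; rfl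
  | cons v rest =>
    have hne : v - 1 ≠ v := by omega
    have hne' : v ≠ v - 1 := by omega
    rw [altLoop_cons]
    simp only
    rw [show (v :: rest) = List.replicate (1 + (rest.takeWhile (· == v)).length) v ++ rest.dropWhile (· == v) from head_run_decomp v rest]
    rw [absA_replicate _ _ hg]
    have hlen : (rest.dropWhile (· == v)).length < n := by
      have := List.length_dropWhile_le (· == v) rest
      simp only [List.length_cons] at hn
      omega
    rw [hd v, hd (v - 1)]
    push_cast
    set c : Int := 1 + ((rest.takeWhile (· == v)).length : Int) with hcdef
    by_cases h1 : c ≤ g v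
    · rw [if_pos h1, if_pos h1]
      apply ih _ hlen _ _ (by intro k; simp only [upd]; split_ifs <;> first | omega | exact hg k) _ _ rfl
      intro k
      rw [PySem.Dict.getD_insert]
      simp only [upd]
      split_ifs <;> simp_all
    · rw [if_neg h1, if_neg h1]
      by_cases h2 : c - g v > g (v - 1)
      · rw [if_pos h2, if_neg (show ¬(c - g v ≤ g (v - 1)) by omega)]
      · rw [if_neg h2, if_pos (show c - g v ≤ g (v - 1) by omega)]
        apply ih _ hlen _ _ (by intro k; simp only [upd]; split_ifs <;> first | omega | exact hg k) _ _ rfl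
        intro k
        rw [PySem.Dict.getD_insert, PySem.Dict.getD_insert]
        simp only [upd]
        split_ifs <;> simp_all

lemma solveBuild_getD (xs : List Int) (d : PySem.Dict Int Int) (k : Int) :
    (solveBuild d xs).getD k 0 = d.getD k 0 + (xs.count k : Int) := by
  induction xs generalizing d with
  | nil => simp [solveBuild]
  | cons i rest ih =>
      have hd1 : ∀ j, ((if d.contains i then d else d.insert i 0).getD j 0) = d.getD j 0 := by
        intro j
        split
        · rfl
        · next h =>
          rw [PySem.Dict.getD_insert]
          split
          · next hj => rw [hj, PySem.Dict.getD_of_not_contains _ _ (by simpa using h)]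
          · rfl
      rw [solveBuild, ih, PySem.Dict.getD_modify, List.count_cons]
      by_cases hk : k = i
      · rw [if_pos hk, hk, hd1]
        simp
        ring
      · rw [if_neg hk, hd1]
        have : (i == k) = false := by simp [Ne.symm hk]
        simp [this]

lemma altBuild_getD (xs : List Int) (d : PySem.Dict Int Int) (k : Int) :
    (altBuild d xs).getD k 0 = d.getD k 0 + (xs.count k : Int) := by
  induction xs generalizing d with
  | nil => simp [altBuild]
  | cons x rest ih =>
      rw [altBuild, ih, PySem.Dict.getD_insert, List.count_cons]
      by_cases hk : k = x
      · rw [if_pos hk, hk]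
        simp
        ring
      · rw [if_neg hk]
        have : (x == k) = false := by simp [Ne.symm hk]
        simp [this]

-- ===== VERDICT (by name: the statement is the Claim_ definition above) =====
theorem solve_spec : Claim_equal_solve := by
  intro L1 L2 _
  unfold Spec_solve solve solve_alt
  rw [solveLoop_eq_absA]
  have hA : (fun k => (solveBuild PySem.Dict.empty L1).getD k 0) = (fun k => (L1.count k : Int)) := by
    funext k; rw [solveBuild_getD]; simp
  rw [hA]
  exact (absB_eq_absA _ _ (by intro k; positivity) _
    (by intro k; rw [altBuild_getD]; simp)).symm
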